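-- pv_equiv track=rewrite | github.com/gdahlberg55/comfywfbuilder2.0 | code_modules/zigzag_workflow_reorganizer.py | identify_stages
-- ===== SOURCE A (Python) =====
-- from typing import Dict, List, Tuple, Set, Optional
--
-- def identify_stages(sorted_nodes: List[int], connections: Dict, categories: Dict) -> Dict[str, List[int]]:
--     """Identify logical stages in the workflow"""
--     stages = {
--         'input': [],
--         'preprocessing': [],
--         'generation': [],
--         'postprocessing': [],
--         'output': []
--     }
--
--     for node_id in sorted_nodes:
--         # Determine stage based on category and connections
--         for cat, nodes in categories.items():
--             if node_id in nodes:
--                 if cat in ['loaders', 'controls']: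
--                     stages['input'].append(node_id)
--                 elif cat in ['conditioning', 'video_processing']:
--                     stages['preprocessing'].append(node_id)
--                 elif cat in ['sampling', 'vae']:
--                     stages['generation'].append(node_id)
--                 elif cat in ['interpolation', 'image_processing']:
--                     stages['postprocessing'].append(node_id)
--                 elif cat in ['output', 'video']:
--                     stages['output'].append(node_id)
--                 else:
--                     stages['generation'].append(node_id)
--                 break
--
--     return stages
-- ===== SOURCE B (Python) =====
-- from typing import Dict, List
--
-- _STAGE_OF_CAT = {
--     'loaders': 'input', 'controls': 'input',
--     'conditioning': 'preprocessing', 'video_processing': 'preprocessing',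
--     'sampling': 'generation', 'vae': 'generation',
--     'interpolation': 'postprocessing', 'image_processing': 'postprocessing',
--     'output': 'output', 'video': 'output',
-- }
--
-- def identify_stages(sorted_nodes: List[int], connections: Dict, categories: Dict) -> Dict[str, List[int]]:
--     """Identify logical stages in the workflow (index-based reimplementation)."""
--     # Build node -> stage once: first category containing a node wins.
--     node_stage = {}
--     for cat, nodes in categories.items():
--         stage = _STAGE_OF_CAT.get(cat, 'generation')
--         for n in nodes:
--             if n not in node_stage:
--                 node_stage[n] = stage
--     stages = {'input': [], 'preprocessing': [], 'generation': [],
--               'postprocessing': [], 'output': []}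
--     for node_id in sorted_nodes:
--         stage = node_stage.get(node_id)
--         if stage is not None:
--             stages[stage].append(node_id)
--     return stages
-- ===== Notes on version B (the rewrite author's own statement) =====
-- stated objective: faster
-- what changed: Instead of scanning all categories for every node, B builds a node->stage index once (first category containing a node wins) and then does one O(1) lookup per node.
import Mathlib
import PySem

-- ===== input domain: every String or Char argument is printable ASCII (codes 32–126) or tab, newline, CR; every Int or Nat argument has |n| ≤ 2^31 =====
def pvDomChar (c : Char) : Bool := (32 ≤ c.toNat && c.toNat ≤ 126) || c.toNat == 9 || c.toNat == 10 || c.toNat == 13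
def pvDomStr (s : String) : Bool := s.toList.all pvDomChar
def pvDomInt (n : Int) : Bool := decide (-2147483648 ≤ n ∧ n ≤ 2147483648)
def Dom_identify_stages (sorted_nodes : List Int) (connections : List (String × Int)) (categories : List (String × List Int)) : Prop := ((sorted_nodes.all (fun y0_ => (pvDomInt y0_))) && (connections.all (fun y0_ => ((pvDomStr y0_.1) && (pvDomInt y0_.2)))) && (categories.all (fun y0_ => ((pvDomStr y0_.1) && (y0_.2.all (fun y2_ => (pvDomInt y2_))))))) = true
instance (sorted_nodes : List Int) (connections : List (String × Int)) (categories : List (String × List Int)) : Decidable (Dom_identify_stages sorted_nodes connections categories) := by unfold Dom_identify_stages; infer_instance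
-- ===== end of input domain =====

-- B replaces A's per-node scan of all categories by a node->stage index built once (faster; asymptotic).


-- ===== PORT A =====
-- the initial stages dict
def pvStages0 : PySem.Dict String (List Int) :=
  PySem.Dict.ofList [("input", []), ("preprocessing", []), ("generation", []), ("postprocessing", []), ("output", [])]

-- A's inner 'for cat, nodes in categories.items(): … break' loop for one node_id
def pvAInner (node_id : Int) (cats : List (String × List Int))
    (stages : PySem.Dict String (List Int)) : PySem.Dict String (List Int) :=
  match cats with
  | [] => stages
  | (cat, nodes) :: rest =>
    if node_id ∈ nodes then
      if cat ∈ ["loaders", "controls"] then stages.modify "input" [] (· ++ [node_id])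
      else if cat ∈ ["conditioning", "video_processing"] then stages.modify "preprocessing" [] (· ++ [node_id])
      else if cat ∈ ["sampling", "vae"] then stages.modify "generation" [] (· ++ [node_id])
      else if cat ∈ ["interpolation", "image_processing"] then stages.modify "postprocessing" [] (· ++ [node_id])
      else if cat ∈ ["output", "video"] then stages.modify "output" [] (· ++ [node_id])
      else stages.modify "generation" [] (· ++ [node_id])
    else pvAInner node_id rest stages

def identify_stages (sorted_nodes : List Int) (connections : List (String × Int)) (categories : List (String × List Int)) : List (String × List Int) :=
  (sorted_nodes.foldl (fun stages node_id => pvAInner node_id categories stages) pvStages0).items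

-- ===== PORT B =====
def pvStageOfCat : PySem.Dict String String :=
  PySem.Dict.mk [("loaders", "input"), ("controls", "input"),
    ("conditioning", "preprocessing"), ("video_processing", "preprocessing"),
    ("sampling", "generation"), ("vae", "generation"),
    ("interpolation", "postprocessing"), ("image_processing", "postprocessing"),
    ("output", "output"), ("video", "output")]

-- B's index: node -> stage, first category containing the node wins
def pvBuildIndex (categories : List (String × List Int)) : PySem.Dict Int String :=
  categories.foldl
    (fun m p =>
      let stage := pvStageOfCat.getD p.1 "generation"
      p.2.foldl (fun m n => if m.contains n then m else m.insert n stage) m)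
    PySem.Dict.empty

def identify_stages_alt (sorted_nodes : List Int) (connections : List (String × Int)) (categories : List (String × List Int)) : List (String × List Int) :=
  let node_stage := pvBuildIndex categories
  (sorted_nodes.foldl
    (fun stages node_id =>
      match node_stage.get? node_id with
      | some stage => stages.modify stage [] (· ++ [node_id])
      | none => stages)
    pvStages0).items

-- ===== PRECONDITION & SPEC =====
def Spec_identify_stages (sorted_nodes : List Int) (connections : List (String × Int)) (categories : List (String × List Int)) (out : List (String × List Int)) : Prop := out = identify_stages_alt sorted_nodes connections categories
instance (sorted_nodes : List Int) (connections : List (String × Int)) (categories : List (String × List Int)) (out : List (String × List Int)) : Decidable (Spec_identify_stages sorted_nodes connections categories out) := by unfold Spec_identify_stages; infer_instance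

-- ===== CLAIM (what is proved, stated in full; the proofs are below) =====
def Claim_equal_identify_stages : Prop := ∀ (sorted_nodes : List Int) (connections : List (String × Int)) (categories : List (String × List Int)), Dom_identify_stages sorted_nodes connections categories → Spec_identify_stages sorted_nodes connections categories (identify_stages sorted_nodes connections categories)

-- ===== LEMMAS AND PROOFS =====

-- the stage A's first-match scan assigns to node_id, if any (proof-side characterisation)
def pvScan (node_id : Int) : List (String × List Int) → Option String
  | [] => none
  | (cat, nodes) :: rest =>
      if node_id ∈ nodes then some (pvStageOfCat.getD cat "generation")
      else pvScan node_id rest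

-- A's if-chain on cat is exactly a modify at the looked-up stage name
lemma pvChain_eq (cat : String) (node_id : Int) (stages : PySem.Dict String (List Int)) :
    (if cat ∈ ["loaders", "controls"] then stages.modify "input" [] (· ++ [node_id])
     else if cat ∈ ["conditioning", "video_processing"] then stages.modify "preprocessing" [] (· ++ [node_id])
     else if cat ∈ ["sampling", "vae"] then stages.modify "generation" [] (· ++ [node_id])
     else if cat ∈ ["interpolation", "image_processing"] then stages.modify "postprocessing" [] (· ++ [node_id])
     else if cat ∈ ["output", "video"] then stages.modify "output" [] (· ++ [node_id])
     else stages.modify "generation" [] (· ++ [node_id]))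
    = stages.modify (pvStageOfCat.getD cat "generation") [] (· ++ [node_id]) := by
  simp only [List.mem_cons, List.not_mem_nil, or_false]
  split_ifs with h1 h2 h3 h4 h5
  · rcases h1 with h | h <;> subst h <;> rfl
  · rcases h2 with h | h <;> subst h <;> rfl
  · rcases h3 with h | h <;> subst h <;> rfl
  · rcases h4 with h | h <;> subst h <;> rfl
  · rcases h5 with h | h <;> subst h <;> rfl
  · push_neg at h1 h2 h3 h4 h5
    have hg : pvStageOfCat.getD cat "generation" = "generation" := by
      simp only [pvStageOfCat, PySem.Dict.getD_eq_get?_getD, PySem.Dict.get?_mk_cons,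
        beq_iff_eq]
      simp [Ne.symm h1.1, Ne.symm h1.2, Ne.symm h2.1, Ne.symm h2.2, Ne.symm h3.1,
        Ne.symm h3.2, Ne.symm h4.1, Ne.symm h4.2, Ne.symm h5.1, Ne.symm h5.2,
        PySem.Dict.get?]
    rw [hg]

-- the inner loop of A equals one modify at the scanned stage (or no-op)
lemma pvAInner_eq (node_id : Int) (cats : List (String × List Int))
    (stages : PySem.Dict String (List Int)) :
    pvAInner node_id cats stages =
      match pvScan node_id cats with
      | some s => stages.modify s [] (· ++ [node_id])
      | none => stages := by
  induction cats generalizing stages with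
  | nil => rfl
  | cons p rest ih =>
      obtain ⟨cat, nodes⟩ := p
      by_cases h : node_id ∈ nodes
      · simp only [pvAInner, pvScan, if_pos h]
        exact pvChain_eq cat node_id stages
      · simp only [pvAInner, pvScan, if_neg h, ih]

-- inner index-building fold: earlier entries win
lemma pvGet?_foldl_nodes (nodes : List Int) (stage : String) (m : PySem.Dict Int String) (n : Int) :
    (nodes.foldl (fun m x => if m.contains x then m else m.insert x stage) m).get? n
      = (m.get? n).or (if n ∈ nodes then some stage else none) := by
  induction nodes generalizing m with
  | nil => simp
  | cons x rest ih =>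
      simp only [List.foldl_cons, ih, List.mem_cons]
      by_cases hx : m.contains x
      · simp only [if_pos hx]
        by_cases hn : n = x
        · subst hn
          rw [PySem.Dict.contains_eq_isSome_get?] at hx
          cases h : m.get? n with
          | none => rw [h] at hx; simp at hx
          | some v => simp
        · simp [hn]
      · simp only [if_neg hx]
        by_cases hn : n = x
        · subst hn
          rw [PySem.Dict.contains_eq_isSome_get?] at hx
          cases h : m.get? n with
          | none => simp [PySem.Dict.get?_insert_self]
          | some v => rw [h] at hx; simp at hx
        · simp [PySem.Dict.get?_insert_of_ne _ _ hn, hn]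

-- the whole index fold: lookup = first-match scan (relative to an accumulator)
lemma pvGet?_build_aux (cats : List (String × List Int)) (m : PySem.Dict Int String) (n : Int) :
    (cats.foldl
        (fun m p =>
          let stage := pvStageOfCat.getD p.1 "generation"
          p.2.foldl (fun m x => if m.contains x then m else m.insert x stage) m)
        m).get? n
      = (m.get? n).or (pvScan n cats) := by
  induction cats generalizing m with
  | nil => simp [pvScan]
  | cons p rest ih =>
      obtain ⟨cat, nodes⟩ := p
      simp only [List.foldl_cons, ih, pvGet?_foldl_nodes, pvScan]
      by_cases h : n ∈ nodes <;> cases m.get? n <;> simp [h]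

lemma pvGet?_build (cats : List (String × List Int)) (n : Int) :
    (pvBuildIndex cats).get? n = pvScan n cats := by
  simp [pvBuildIndex, pvGet?_build_aux]

-- ===== VERDICT (by name: the statement is the Claim_ definition above) =====
theorem identify_stages_spec : Claim_equal_identify_stages := by
  intro sorted_nodes connections categories _
  unfold Spec_identify_stages identify_stages identify_stages_alt
  simp only [pvAInner_eq, pvGet?_build]
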